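-- pv_equiv track=rewrite | github.com/code-cp/leetcode | solutions/2100/main.py | getInflection
-- ===== SOURCE A (Python) =====
-- from collections import deque
--
-- def getInflection(nums, reverse=False):
--     n = len(nums)
--     stack = deque()
--
--     if reverse:
--         result = [-1] * n
--         rn = range(n-1, -1, -1)
--         invalid = n
--     else:
--         result = [n] * n
--         rn = range(n)
--         invalid = -1
--
--     for i in rn:
--         while len(stack) != 0 and nums[i] < 0:
--             idx = stack.pop()
--             if nums[idx] <= 0:
--                 result[idx] = i
--             else:
--                 result[idx] = invalid
--         stack.append(i)
--     return result
-- ===== SOURCE B (Python) =====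
-- def getInflection(nums, reverse=False):
--     # Single scalar "nearest negative index" scan in the opposite direction; no stack.
--     n = len(nums)
--     if reverse:
--         result = []
--         lastNeg = -1
--         for i, x in enumerate(nums):
--             result.append(lastNeg if x <= 0 else (n if lastNeg > -1 else -1))
--             if x < 0:
--                 lastNeg = i
--         return result
--     result = []
--     lastNeg = n
--     for i in range(n - 1, -1, -1):
--         x = nums[i]
--         result.append(lastNeg if x <= 0 else (-1 if lastNeg < n else n))
--         if x < 0:
--             lastNeg = i
--     result.reverse()
--     return result
-- ===== Notes on version B (the rewrite author's own statement) =====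
-- stated objective: simpler
-- what changed: Replaces the deque of pending indices (flushed wholesale at each negative by an inner while loop) with a single scalar holding the nearest negative index, scanning in the opposite direction; no stack and no inner loop.
import Mathlib
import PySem

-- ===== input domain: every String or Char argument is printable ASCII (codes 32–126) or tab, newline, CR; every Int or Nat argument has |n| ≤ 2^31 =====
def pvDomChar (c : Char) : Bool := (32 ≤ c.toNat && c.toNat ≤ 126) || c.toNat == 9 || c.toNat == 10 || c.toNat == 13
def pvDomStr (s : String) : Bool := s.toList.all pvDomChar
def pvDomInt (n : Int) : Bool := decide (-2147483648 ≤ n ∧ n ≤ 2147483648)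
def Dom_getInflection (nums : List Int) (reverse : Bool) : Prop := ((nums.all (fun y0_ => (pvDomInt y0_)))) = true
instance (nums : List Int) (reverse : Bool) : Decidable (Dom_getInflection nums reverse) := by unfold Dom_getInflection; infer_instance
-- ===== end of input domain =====

-- B replaces A's deque of pending indices (flushed wholesale at every negative) by a single
-- scalar holding the nearest negative index, scanning in the opposite direction (simpler; same O(n)).

-- ===== PORT A =====
-- the inner 'while len(stack) != 0 and nums[i] < 0' loop; deque pop/append at the right = head of the list here.
-- result[idx] = v is 'result.set idx.toNat v': exact, since every idx pushed on the stack is a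
-- nonnegative in-range index; nums[i] is pyGetD (every i an in-range index from the range).
def pvPopA (nums : List Int) (i invalid : Int) (result : List Int) : List Int → List Int × List Int
  | [] => (result, [])
  | idx :: rest =>
    if PySem.List.pyGetD nums i 0 < 0 then
      pvPopA nums i invalid
        (result.set idx.toNat (if PySem.List.pyGetD nums idx 0 ≤ 0 then i else invalid)) rest
    else (result, idx :: rest)

def pvStepA (nums : List Int) (invalid : Int) (s : List Int × List Int) (i : Int) :
    List Int × List Int :=
  let t := pvPopA nums i invalid s.1 s.2
  (t.1, i :: t.2)

def getInflection (nums : List Int) (reverse : Bool) : List Int :=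
  let n : Int := nums.length
  let init : List Int × List Int × Int :=
    if reverse then (List.replicate nums.length (-1 : Int), PySem.List.pyRange (n - 1) (-1) (-1), n)
    else (List.replicate nums.length n, PySem.List.pyRange 0 n 1, (-1 : Int))
  (init.2.1.foldl (pvStepA nums init.2.2) (init.1, [])).1

-- ===== PORT B =====
def getInflection_alt (nums : List Int) (reverse : Bool) : List Int :=
  let n : Int := nums.length
  if reverse then
    ((PySem.List.enumerate nums 0).foldl
      (fun (s : List Int × Int) p =>
        (s.1 ++ [if p.2 ≤ 0 then s.2 else if s.2 > -1 then n else -1],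
         if p.2 < 0 then p.1 else s.2)) ([], -1)).1
  else
    ((PySem.List.pyRange (n - 1) (-1) (-1)).foldl
      (fun (s : List Int × Int) i =>
        (s.1 ++ [if PySem.List.pyGetD nums i 0 ≤ 0 then s.2
                 else if s.2 < n then -1 else n],
         if PySem.List.pyGetD nums i 0 < 0 then i else s.2)) ([], n)).1.reverse

-- ===== PRECONDITION & SPEC =====
def Spec_getInflection (nums : List Int) (reverse : Bool) (out : List Int) : Prop := out = getInflection_alt nums reverse
instance (nums : List Int) (reverse : Bool) (out : List Int) : Decidable (Spec_getInflection nums reverse out) := by unfold Spec_getInflection; infer_instance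

-- ===== CLAIM (what is proved, stated in full; the proofs are below) =====
def Claim_equal_getInflection : Prop := ∀ (nums : List Int) (reverse : Bool), Dom_getInflection nums reverse → Spec_getInflection nums reverse (getInflection nums reverse)

-- ===== LEMMAS AND PROOFS =====

-- first index in l whose nums-value is negative
def pvFN (nums : List Int) (l : List Int) : Option Int :=
  l.find? (fun k => decide (PySem.List.pyGetD nums k 0 < 0))

-- the suffix of l strictly after the first occurrence of j
def pvTailAfter (j : Int) : List Int → List Int
  | [] => []
  | x :: xs => if x = j then xs else pvTailAfter j xs

-- the final value A assigns at a position j whose "next negative in iteration order" is o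
def pvWr (nums : List Int) (invalid j dflt : Int) (o : Option Int) : Int :=
  match o with
  | some k => if PySem.List.pyGetD nums j 0 ≤ 0 then k else invalid
  | none => dflt

-- B's scalar state after scanning is
def pvLastN (nums : List Int) (is : List Int) (ln : Int) : Int :=
  is.foldl (fun l i => if PySem.List.pyGetD nums i 0 < 0 then i else l) ln

-- B's output stream over iteration list is with value function val
def pvScan (nums : List Int) (val : Int → Int → Int) : List Int → Int → List Int
  | [], _ => []
  | i :: is, ln =>
    val i ln :: pvScan nums val is (if PySem.List.pyGetD nums i 0 < 0 then i else ln)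

theorem pvScan_length (nums : List Int) (val : Int → Int → Int) (is : List Int) (ln : Int) :
    (pvScan nums val is ln).length = is.length := by
  induction is generalizing ln with
  | nil => simp [pvScan]
  | cons i is ih => simp [pvScan, ih]

theorem pvScan_append (nums : List Int) (val : Int → Int → Int) (is1 is2 : List Int) (ln : Int) :
    pvScan nums val (is1 ++ is2) ln =
      pvScan nums val is1 ln ++ pvScan nums val is2 (pvLastN nums is1 ln) := by
  induction is1 generalizing ln with
  | nil => simp [pvScan, pvLastN]
  | cons i is ih => simp [pvScan, pvLastN, List.foldl_cons, ih]

theorem pvLastN_eq_fn_reverse (nums : List Int) (is : List Int) (ln : Int) :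
    pvLastN nums is ln = (pvFN nums is.reverse).getD ln := by
  induction is generalizing ln with
  | nil => simp [pvLastN, pvFN]
  | cons i is ih =>
    simp only [pvLastN, List.foldl_cons, List.reverse_cons, pvFN, List.find?_append]
    have := ih (if PySem.List.pyGetD nums i 0 < 0 then i else ln)
    simp only [pvLastN, pvFN] at this
    rw [this]
    cases h : List.find? (fun k => decide (PySem.List.pyGetD nums k 0 < 0)) is.reverse with
    | some k => simp [h]
    | none => simp [h, List.find?]; split_ifs with hneg <;> simp [hneg]

-- B's fold with accumulator-append is acc ++ pvScan
theorem pvFoldB (nums : List Int) (val : Int → Int → Int) (is : List Int) (acc : List Int)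
    (ln : Int) :
    (is.foldl (fun (s : List Int × Int) i =>
        (s.1 ++ [val i s.2], if PySem.List.pyGetD nums i 0 < 0 then i else s.2)) (acc, ln)) =
      (acc ++ pvScan nums val is ln, pvLastN nums is ln) := by
  induction is generalizing acc ln with
  | nil => simp [pvScan, pvLastN]
  | cons i is ih => simp [pvScan, pvLastN, List.foldl_cons, ih]

-- ---- A-side machine characterisation ----

theorem pvPopA_nonneg (nums : List Int) (i invalid : Int) (r st : List Int)
    (h : ¬ PySem.List.pyGetD nums i 0 < 0) :
    pvPopA nums i invalid r st = (r, st) := by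
  cases st <;> simp [pvPopA, h]

theorem pvPopA_neg (nums : List Int) (i invalid : Int) (r st : List Int)
    (h : PySem.List.pyGetD nums i 0 < 0) :
    pvPopA nums i invalid r st =
      (st.foldl (fun r idx =>
        r.set idx.toNat (if PySem.List.pyGetD nums idx 0 ≤ 0 then i else invalid)) r, []) := by
  induction st generalizing r with
  | nil => simp [pvPopA]
  | cons idx rest ih => simp [pvPopA, h, List.foldl_cons, ih]

theorem pvSetFold_length (w : Int → Int) (st r : List Int) :
    (st.foldl (fun r idx => r.set idx.toNat (w idx)) r).length = r.length := by
  induction st generalizing r with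
  | nil => rfl
  | cons idx rest ih => simp [List.foldl_cons, ih]

theorem pvSetFold_getD (w : Int → Int) (st r : List Int) (j : Nat) (hj : j < r.length)
    (hv : ∀ idx ∈ st, 0 ≤ idx) :
    (st.foldl (fun r idx => r.set idx.toNat (w idx)) r).getD j 0 =
      if (j : Int) ∈ st then w j else r.getD j 0 := by
  induction st generalizing r with
  | nil => simp
  | cons idx rest ih =>
    have h0 : 0 ≤ idx := hv idx (by simp)
    by_cases hij : (j : Int) = idx
    · have : idx.toNat = j := by omega
      rw [List.foldl_cons, ih _ (by simpa using hj) (fun k hk => hv k (by simp [hk]))]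
      by_cases hjr : (j : Int) ∈ rest <;>
        simp [hjr, hij, this, List.getD_eq_getElem?_getD, List.getElem?_set_self, hj]
    · have hne : idx.toNat ≠ j := by omega
      rw [List.foldl_cons, ih _ (by simpa using hj) (fun k hk => hv k (by simp [hk]))]
      by_cases hjr : (j : Int) ∈ rest <;>
        simp [hjr, hij, List.getD_eq_getElem?_getD, List.getElem?_set_ne hne]

theorem pvRunA_length (nums : List Int) (invalid : Int) (rn : List Int) (r st : List Int) :
    ((rn.foldl (pvStepA nums invalid) (r, st)).1).length = r.length := by
  induction rn generalizing r st with
  | nil => rfl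
  | cons i rest ih =>
    rw [List.foldl_cons]
    by_cases h : PySem.List.pyGetD nums i 0 < 0
    · simp only [pvStepA, pvPopA_neg nums i invalid r st h]
      rw [ih]; exact pvSetFold_length _ _ _
    · simp only [pvStepA, pvPopA_nonneg nums i invalid r st h]
      exact ih r (i :: st)

-- main invariant: the value at position j after running A's loop
theorem pvRunA_getD (nums : List Int) (invalid : Int) (rn : List Int) :
    ∀ (r st : List Int) (j : Nat),
      (∀ i ∈ st ++ rn, 0 ≤ i ∧ i < (r.length : Int)) → (st ++ rn).Nodup → j < r.length →
    ((rn.foldl (pvStepA nums invalid) (r, st)).1).getD j 0 =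
      if (j : Int) ∈ st then pvWr nums invalid j (r.getD j 0) (pvFN nums rn)
      else if (j : Int) ∈ rn then pvWr nums invalid j (r.getD j 0) (pvFN nums (pvTailAfter j rn))
      else r.getD j 0 := by
  induction rn with
  | nil =>
    intro r st j hv hnd hj
    simp only [List.foldl_nil, pvFN, List.find?_nil, pvWr]
    split_ifs <;> rfl
  | cons i rest ih =>
    intro r st j hv hnd hj
    have hi : 0 ≤ i ∧ i < (r.length : Int) := hv i (by simp)
    obtain ⟨hstnd, hnd2, hdj0⟩ := List.nodup_append.mp hnd
    obtain ⟨hirest, hrestnd⟩ := List.nodup_cons.mp hnd2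
    have hdj : ∀ a : Int, a ∈ st → a ∈ i :: rest → False := fun a ha hb => hdj0 a ha a hb rfl
    have hist : i ∉ st := fun hh => hdj i hh (by simp)
    rw [List.foldl_cons]
    by_cases h : PySem.List.pyGetD nums i 0 < 0
    · -- nums[i] < 0 : the whole stack is flushed, stack becomes [i]
      simp only [pvStepA, pvPopA_neg nums i invalid r st h]
      set w : Int → Int := fun idx => if PySem.List.pyGetD nums idx 0 ≤ 0 then i else invalid with hw
      have hlen : (st.foldl (fun r idx => r.set idx.toNat (w idx)) r).length = r.length :=
        pvSetFold_length w st r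
      have hfn : pvFN nums (i :: rest) = some i := by
        simp [pvFN, List.find?_cons_of_pos, h]
      have hv' : ∀ k ∈ [i] ++ rest,
          0 ≤ k ∧ k < ((st.foldl (fun r idx => r.set idx.toNat (w idx)) r).length : Int) := by
        intro k hk; rw [hlen]
        rcases List.mem_append.1 hk with hk | hk
        · simp at hk; subst hk; exact hi
        · exact hv k (by simp [hk])
      have hnd' : ([i] ++ rest).Nodup := by
        simpa [List.nodup_cons] using ⟨hirest, hrestnd⟩
      have ihr := ih (st.foldl (fun r idx => r.set idx.toNat (w idx)) r) [i] j hv' hnd'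
        (by rwa [hlen])
      rw [ihr, pvSetFold_getD w st r j hj (fun k hk => (hv k (by simp [hk])).1)]
      by_cases hjs : (j : Int) ∈ st
      · have hji : (j : Int) ≠ i := fun e => hist (e ▸ hjs)
        have hjr : (j : Int) ∉ rest := fun e => hdj _ hjs (by simp [e])
        simp [hjs, hji, hjr, hfn, pvWr, hw]
      · by_cases hji : (j : Int) = i
        · simp [hjs, hji, hist, pvTailAfter]
        · have hta : pvTailAfter (j : Int) (i :: rest) = pvTailAfter (j : Int) rest := by
            simp [pvTailAfter, Ne.symm hji]
          by_cases hjr : (j : Int) ∈ rest <;>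
            simp [hjs, hjr, hji, Ne.symm hji, hta, pvWr]
    · -- nums[i] >= 0 : nothing is popped, i is pushed
      simp only [pvStepA, pvPopA_nonneg nums i invalid r st h]
      have hfn : pvFN nums (i :: rest) = pvFN nums rest := by
        simp [pvFN, List.find?_cons_of_neg, h]
      have hv' : ∀ k ∈ (i :: st) ++ rest, 0 ≤ k ∧ k < (r.length : Int) := by
        intro k hk
        rcases List.mem_append.1 hk with hk | hk
        · rcases List.mem_cons.1 hk with hk | hk
          · subst hk; exact hi
          · exact hv k (by simp [hk])
        · exact hv k (by simp [hk])
      have hnd' : ((i :: st) ++ rest).Nodup := by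
        refine List.nodup_append.mpr ⟨List.nodup_cons.mpr ⟨hist, hstnd⟩, hrestnd, ?_⟩
        intro a ha b hb hab
        subst hab
        rcases List.mem_cons.1 ha with ha | ha
        · exact hirest (ha ▸ hb)
        · exact hdj a ha (by simp [hb])
      have ihr := ih r (i :: st) j hv' hnd' hj
      rw [ihr]
      by_cases hjs : (j : Int) ∈ st
      · simp [hjs, hfn]
      · by_cases hji : (j : Int) = i
        · simp [hjs, hji, hfn, pvTailAfter]
        · have hta : pvTailAfter (j : Int) (i :: rest) = pvTailAfter (j : Int) rest := by
            simp [pvTailAfter, Ne.symm hji]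
          by_cases hjr : (j : Int) ∈ rest <;> simp [hjs, hji, hjr, hta]

-- ---- assembly helpers ----

theorem pvExtGetD (l1 l2 : List Int) (h : l1.length = l2.length)
    (hp : ∀ j : Nat, j < l1.length → l1.getD j 0 = l2.getD j 0) : l1 = l2 := by
  apply List.ext_getElem h
  intro j h1 h2
  have := hp j h1
  simpa [List.getD_eq_getElem?_getD, List.getElem?_eq_getElem, h1, h2] using this

theorem pvGetD_reverse (l : List Int) (m : Nat) (hm : m < l.length) :
    l.reverse.getD m 0 = l.getD (l.length - 1 - m) 0 := by
  have h2 : l.length - 1 - m < l.length := by omega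
  simp [List.getD_eq_getElem?_getD, List.getElem?_eq_getElem, hm, h2, List.getElem_reverse]

theorem pvGetD_mid (l1 l2 : List Int) (x : Int) : (l1 ++ x :: l2).getD l1.length 0 = x := by
  simp [List.getD_eq_getElem?_getD]

theorem pvGetD_mid' (l1 l2 : List Int) (x : Int) (m : Nat) (hm : l1.length = m) :
    (l1 ++ x :: l2).getD m 0 = x := by
  subst hm; exact pvGetD_mid l1 l2 x

theorem pvGetD_replicate (m : Nat) (a : Int) (j : Nat) (hj : j < m) :
    (List.replicate m a).getD j 0 = a := by
  simp [List.getD_eq_getElem?_getD, hj]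

theorem pvTailAfter_asc_aux (k : Nat) : ∀ a b j : Int, (b - a).toNat ≤ k → a ≤ j → j < b →
    pvTailAfter j (PySem.List.pyRange a b 1) = PySem.List.pyRange (j + 1) b 1 := by
  induction k with
  | zero => intro a b j hk h1 h2; omega
  | succ k ih =>
    intro a b j hk h1 h2
    have hab : a < b := lt_of_le_of_lt h1 h2
    rw [PySem.List.pyRange_one_cons hab]
    by_cases hja : a = j
    · subst hja; simp [pvTailAfter]
    · simp only [pvTailAfter, if_neg hja]
      exact ih (a + 1) b j (by omega) (by omega) h2

theorem pvTailAfter_asc (a b j : Int) (h1 : a ≤ j) (h2 : j < b) :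
    pvTailAfter j (PySem.List.pyRange a b 1) = PySem.List.pyRange (j + 1) b 1 :=
  pvTailAfter_asc_aux (b - a).toNat a b j (Nat.le_refl _) h1 h2

theorem pvTailAfter_rev_asc_aux (k : Nat) : ∀ a b j : Int, (b - a).toNat ≤ k → a ≤ j → j < b →
    pvTailAfter j ((PySem.List.pyRange a b 1).reverse) = (PySem.List.pyRange a j 1).reverse := by
  induction k with
  | zero => intro a b j hk h1 h2; omega
  | succ k ih =>
    intro a b j hk h1 h2
    have hb : b = (b - 1) + 1 := by omega
    rw [hb, PySem.List.pyRange_one_succ_right (by omega : a ≤ b - 1), List.reverse_append]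
    simp only [List.reverse_cons, List.reverse_nil, List.nil_append, List.singleton_append]
    by_cases hjb : b - 1 = j
    · subst hjb; simp [pvTailAfter]
    · simp only [pvTailAfter, if_neg hjb]
      exact ih a (b - 1) j (by omega) h1 (by omega)

theorem pvTailAfter_rev_asc (a b j : Int) (h1 : a ≤ j) (h2 : j < b) :
    pvTailAfter j ((PySem.List.pyRange a b 1).reverse) = (PySem.List.pyRange a j 1).reverse :=
  pvTailAfter_rev_asc_aux (b - a).toNat a b j (Nat.le_refl _) h1 h2

-- the two value-form bridges
theorem pvBridgeR (nums : List Int) (n j : Int) (L : List Int) (hL : ∀ k ∈ L, 0 ≤ k) :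
    (if PySem.List.pyGetD nums j 0 ≤ 0 then (pvFN nums L).getD (-1)
     else if (pvFN nums L).getD (-1) > -1 then n else -1) =
      pvWr nums n j (-1) (pvFN nums L) := by
  cases h : pvFN nums L with
  | none => simp [pvWr]
  | some k =>
    have hk : 0 ≤ k := hL k (List.mem_of_find?_eq_some h)
    simp only [pvWr, Option.getD_some]
    split_ifs <;> first | rfl | omega

theorem pvBridgeF (nums : List Int) (n j : Int) (L : List Int) (hL : ∀ k ∈ L, k < n) :
    (if PySem.List.pyGetD nums j 0 ≤ 0 then (pvFN nums L).getD n
     else if (pvFN nums L).getD n < n then -1 else n) =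
      pvWr nums (-1) j n (pvFN nums L) := by
  cases h : pvFN nums L with
  | none => simp [pvWr]
  | some k =>
    have hk : k < n := hL k (List.mem_of_find?_eq_some h)
    simp only [pvWr, Option.getD_some]
    split_ifs <;> first | rfl | omega

-- ---- the two directions ----

theorem pvForwardEq (nums : List Int) :
    getInflection nums false = getInflection_alt nums false := by
  set n : Int := (nums.length : Int) with hn
  have hdesc : PySem.List.pyRange (n - 1) (-1) (-1) = (PySem.List.pyRange 0 n 1).reverse := by
    rw [PySem.List.pyRange_neg_one_eq_reverse]; norm_num
  have hlenasc : (PySem.List.pyRange 0 n 1).length = nums.length := by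
    rw [PySem.List.length_pyRange_one]; omega
  have hB : getInflection_alt nums false =
      (pvScan nums
        (fun i ln => if PySem.List.pyGetD nums i 0 ≤ 0 then ln else if ln < n then -1 else n)
        ((PySem.List.pyRange 0 n 1).reverse) n).reverse := by
    simp only [getInflection_alt, Bool.false_eq_true, if_false, ← hn, hdesc]
    rw [pvFoldB nums
      (fun i ln => if PySem.List.pyGetD nums i 0 ≤ 0 then ln else if ln < n then -1 else n)]
    simp
  have hAlen : (getInflection nums false).length = nums.length := by
    simp only [getInflection, Bool.false_eq_true, if_false, ← hn]
    rw [pvRunA_length]; simp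
  have hA : ∀ j : Nat, j < nums.length →
      (getInflection nums false).getD j 0 =
        pvWr nums (-1) j n (pvFN nums (PySem.List.pyRange ((j : Int) + 1) n 1)) := by
    intro j hj
    simp only [getInflection, Bool.false_eq_true, if_false, ← hn]
    rw [pvRunA_getD nums (-1) (PySem.List.pyRange 0 n 1) (List.replicate nums.length n) [] j
      (by intro k hk
          simp only [List.nil_append] at hk
          have := PySem.List.mem_pyRange_one.mp hk
          simp only [List.length_replicate]
          omega)
      (by simpa using PySem.List.nodup_pyRange_one 0 n)
      (by simpa using hj)]
    have hjm : (j : Int) ∈ PySem.List.pyRange 0 n 1 := by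
      rw [PySem.List.mem_pyRange_one]; omega
    simp only [List.not_mem_nil, if_false, hjm, if_true]
    rw [pvTailAfter_asc 0 n j (by omega) (by omega),
      pvGetD_replicate nums.length n j hj]
  have hscan : ∀ m : Nat, m < nums.length →
      (pvScan nums
        (fun i ln => if PySem.List.pyGetD nums i 0 ≤ 0 then ln else if ln < n then -1 else n)
        ((PySem.List.pyRange 0 n 1).reverse) n).getD m 0 =
        pvWr nums (-1) ((nums.length - 1 - m : Nat) : Int) n
          (pvFN nums (PySem.List.pyRange (((nums.length - 1 - m : Nat) : Int) + 1) n 1)) := by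
    intro m hm
    set j : Nat := nums.length - 1 - m with hjdef
    have hlist : (PySem.List.pyRange 0 n 1).reverse =
        (PySem.List.pyRange ((j : Int) + 1) n 1).reverse ++
          ((j : Int) :: (PySem.List.pyRange 0 (j : Int) 1).reverse) := by
      conv_lhs => rw [PySem.List.pyRange_one_append 0 (j : Int) n (by omega) (by omega),
        PySem.List.pyRange_one_append (j : Int) ((j : Int) + 1) n (by omega) (by omega),
        PySem.List.pyRange_one_singleton]
      simp
    rw [hlist, pvScan_append]
    simp only [pvScan]
    have hS1 : (pvScan nums
        (fun i ln => if PySem.List.pyGetD nums i 0 ≤ 0 then ln else if ln < n then -1 else n)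
        ((PySem.List.pyRange ((j : Int) + 1) n 1).reverse) n).length = m := by
      rw [pvScan_length, List.length_reverse, PySem.List.length_pyRange_one]; omega
    rw [pvGetD_mid' _ _ _ _ hS1]
    rw [pvLastN_eq_fn_reverse, List.reverse_reverse]
    exact pvBridgeF nums n j _ (fun k hk => (PySem.List.mem_pyRange_one.mp hk).2)
  have hrev : (getInflection nums false).reverse =
      pvScan nums
        (fun i ln => if PySem.List.pyGetD nums i 0 ≤ 0 then ln else if ln < n then -1 else n)
        ((PySem.List.pyRange 0 n 1).reverse) n := by
    apply pvExtGetD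
    · rw [List.length_reverse, hAlen, pvScan_length, List.length_reverse, hlenasc]
    · intro m hm
      have hm' : m < nums.length := by rwa [List.length_reverse, hAlen] at hm
      rw [pvGetD_reverse _ m (by rwa [hAlen]), hAlen,
        hA (nums.length - 1 - m) (by omega), hscan m hm']
  rw [hB, ← hrev, List.reverse_reverse]

theorem pvReverseEq (nums : List Int) :
    getInflection nums true = getInflection_alt nums true := by
  set n : Int := (nums.length : Int) with hn
  have hdesc : PySem.List.pyRange (n - 1) (-1) (-1) = (PySem.List.pyRange 0 n 1).reverse := by
    rw [PySem.List.pyRange_neg_one_eq_reverse]; norm_num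
  have hlenasc : (PySem.List.pyRange 0 n 1).length = nums.length := by
    rw [PySem.List.length_pyRange_one]; omega
  have hB : getInflection_alt nums true =
      pvScan nums
        (fun i ln => if PySem.List.pyGetD nums i 0 ≤ 0 then ln else if ln > -1 then n else -1)
        (PySem.List.pyRange 0 n 1) (-1) := by
    simp only [getInflection_alt, if_true, ← hn]
    rw [PySem.List.enumerate_eq_map_pyRange nums 0, List.foldl_map]
    rw [pvFoldB nums
      (fun i ln => if PySem.List.pyGetD nums i 0 ≤ 0 then ln else if ln > -1 then n else -1)]
    simp [← hn]
  have hAlen : (getInflection nums true).length = nums.length := by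
    simp only [getInflection, if_true, ← hn]
    rw [pvRunA_length]; simp
  have hA : ∀ j : Nat, j < nums.length →
      (getInflection nums true).getD j 0 =
        pvWr nums n j (-1) (pvFN nums ((PySem.List.pyRange 0 (j : Int) 1).reverse)) := by
    intro j hj
    simp only [getInflection, if_true, ← hn, hdesc]
    rw [pvRunA_getD nums n ((PySem.List.pyRange 0 n 1).reverse) (List.replicate nums.length (-1)) [] j
      (by intro k hk
          simp only [List.nil_append, List.mem_reverse] at hk
          have := PySem.List.mem_pyRange_one.mp hk
          simp only [List.length_replicate]
          omega)
      (by simp only [List.nil_append, List.nodup_reverse]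
          exact PySem.List.nodup_pyRange_one 0 n)
      (by simpa using hj)]
    have hjm : (j : Int) ∈ (PySem.List.pyRange 0 n 1).reverse := by
      rw [List.mem_reverse, PySem.List.mem_pyRange_one]; omega
    simp only [List.not_mem_nil, if_false, hjm, if_true]
    rw [pvTailAfter_rev_asc 0 n j (by omega) (by omega),
      pvGetD_replicate nums.length (-1) j hj]
  have hscan : ∀ j : Nat, j < nums.length →
      (pvScan nums
        (fun i ln => if PySem.List.pyGetD nums i 0 ≤ 0 then ln else if ln > -1 then n else -1)
        (PySem.List.pyRange 0 n 1) (-1)).getD j 0 =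
        pvWr nums n j (-1) (pvFN nums ((PySem.List.pyRange 0 (j : Int) 1).reverse)) := by
    intro j hj
    have hlist : PySem.List.pyRange 0 n 1 =
        PySem.List.pyRange 0 (j : Int) 1 ++ ((j : Int) :: PySem.List.pyRange ((j : Int) + 1) n 1) := by
      conv_lhs => rw [PySem.List.pyRange_one_append 0 (j : Int) n (by omega) (by omega),
        PySem.List.pyRange_one_append (j : Int) ((j : Int) + 1) n (by omega) (by omega),
        PySem.List.pyRange_one_singleton]
      simp
    rw [hlist, pvScan_append]
    simp only [pvScan]
    have hS1 : (pvScan nums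
        (fun i ln => if PySem.List.pyGetD nums i 0 ≤ 0 then ln else if ln > -1 then n else -1)
        (PySem.List.pyRange 0 (j : Int) 1) (-1)).length = j := by
      rw [pvScan_length, PySem.List.length_pyRange_one]; omega
    rw [pvGetD_mid' _ _ _ _ hS1]
    rw [pvLastN_eq_fn_reverse]
    refine pvBridgeR nums n j _ ?_
    intro k hk
    rw [List.mem_reverse] at hk
    exact (PySem.List.mem_pyRange_one.mp hk).1
  apply pvExtGetD
  · rw [hAlen, hB, pvScan_length, hlenasc]
  · intro j hj
    rw [hAlen] at hj
    rw [hB, hA j hj, hscan j hj]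

-- ===== VERDICT (by name: the statement is the Claim_ definition above) =====
-- ===== VERDICT (by name: the statement is the Claim_ definition above) =====
theorem getInflection_spec : Claim_equal_getInflection := by
  intro nums reverse _h
  unfold Spec_getInflection
  cases reverse
  · exact pvForwardEq nums
  · exact pvReverseEq nums
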